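-- pv_equiv track=rewrite | github.com/ct255/historical-court | utils/wiki_tool.py | _is_entertainment_page
-- ===== SOURCE A (Python) =====
-- def _is_entertainment_page(summary: str) -> bool:
--     """Detect if a Wikipedia page is about entertainment media rather than the subject."""
--     entertainment_indicators = [
--         'is a film',
--         'is a movie',
--         'is a documentary',
--         'is a book written',
--         'is a biography written',
--         'is a song by',
--         'is an album by',
--         'is a television series',
--         'is a play',
--         'is a musical',
--         'directed by',
--         'starring',
--         'was released on',  # for media releases
--         'nba', # Sports teams often have "criticism" sections that get picked up
--         'basketball',
--         'twitter', # Social media platforms often have "criticism" sections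
--         'facebook',
--     ]
--     summary_lower = summary.lower()
--     return any(indicator in summary_lower for indicator in entertainment_indicators)
-- ===== SOURCE B (Python) =====
-- import re
--
-- _ENTERTAINMENT_RE = re.compile('|'.join(re.escape(s) for s in [
--     'is a film',
--     'is a movie',
--     'is a documentary',
--     'is a book written',
--     'is a biography written',
--     'is a song by',
--     'is an album by',
--     'is a television series',
--     'is a play',
--     'is a musical',
--     'directed by',
--     'starring',
--     'was released on',
--     'nba',
--     'basketball',
--     'twitter',
--     'facebook',
-- ]))
--
-- def _is_entertainment_page(summary: str) -> bool:
--     """Detect if a Wikipedia page is about entertainment media rather than the subject."""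
--     return _ENTERTAINMENT_RE.search(summary.lower()) is not None
-- ===== Notes on version B (the rewrite author's own statement) =====
-- stated objective: idiomatic
-- what changed: Replaces the per-indicator membership-test loop with one precompiled regex alternation that makes a single search pass over the lowercased summary.
import Mathlib
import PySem

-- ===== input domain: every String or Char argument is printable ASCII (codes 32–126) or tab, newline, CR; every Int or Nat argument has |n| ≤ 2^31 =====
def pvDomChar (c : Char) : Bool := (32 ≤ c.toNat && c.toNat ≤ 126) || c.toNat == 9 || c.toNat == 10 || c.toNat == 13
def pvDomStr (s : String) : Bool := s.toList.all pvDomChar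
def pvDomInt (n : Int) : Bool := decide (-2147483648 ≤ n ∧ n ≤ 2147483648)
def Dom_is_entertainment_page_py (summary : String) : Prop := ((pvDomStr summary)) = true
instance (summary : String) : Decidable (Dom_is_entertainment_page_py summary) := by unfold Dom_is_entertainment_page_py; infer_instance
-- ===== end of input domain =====

-- B replaces the per-indicator membership loop with one compiled regex alternation
-- doing a single left-to-right search pass over the lowercased summary (objective: idiomatic).


-- ===== PORT A =====
-- the constant indicator list of A
def entertainmentIndicators : List String :=
  ["is a film", "is a movie", "is a documentary", "is a book written",
   "is a biography written", "is a song by", "is an album by",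
   "is a television series", "is a play", "is a musical",
   "directed by", "starring", "was released on",
   "nba", "basketball", "twitter", "facebook"]

def is_entertainment_page_py (summary : String) : Bool :=
  let summaryLower := PySem.Str.lower summary
  entertainmentIndicators.any (fun indicator => PySem.Str.isIn indicator summaryLower)

-- ===== PORT B =====
-- B's compiled alternation pattern, as the list of literal branches (all plain literals)
def entertainmentPattern : List (List Char) :=
  ["is a film", "is a movie", "is a documentary", "is a book written",
   "is a biography written", "is a song by", "is an album by",
   "is a television series", "is a play", "is a musical",
   "directed by", "starring", "was released on",
   "nba", "basketball", "twitter", "facebook"].map String.toList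

-- re.search of the alternation: at each position try every branch as a prefix, then advance
def regexSearch (branches : List (List Char)) : List Char → Bool
  | [] => branches.any (fun p => p.isEmpty)
  | c :: rest =>
      branches.any (fun p => p.isPrefixOf (c :: rest)) || regexSearch branches rest

def is_entertainment_page_py_alt (summary : String) : Bool :=
  regexSearch entertainmentPattern (PySem.Str.lower summary).toList

-- ===== PRECONDITION & SPEC =====
def Spec_is_entertainment_page_py (summary : String) (out : Bool) : Prop := out = is_entertainment_page_py_alt summary
instance (summary : String) (out : Bool) : Decidable (Spec_is_entertainment_page_py summary out) := by unfold Spec_is_entertainment_page_py; infer_instance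

-- ===== CLAIM (what is proved, stated in full; the proofs are below) =====
def Claim_equal_is_entertainment_page_py : Prop := ∀ (summary : String), Dom_is_entertainment_page_py summary → Spec_is_entertainment_page_py summary (is_entertainment_page_py summary)

-- ===== LEMMAS AND PROOFS =====

-- the single-pass search finds a branch iff some branch is a prefix of some suffix
theorem regexSearch_iff (branches : List (List Char)) (cs : List Char) :
    regexSearch branches cs = true ↔ ∃ p ∈ branches, ∃ j, p <+: cs.drop j := by
  induction cs with
  | nil =>
      simp [regexSearch, List.isEmpty_iff, List.prefix_nil]
  | cons c rest ih =>
      simp only [regexSearch, Bool.or_eq_true, List.any_eq_true, ih]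
      constructor
      · rintro (⟨p, hp, hpre⟩ | ⟨p, hp, j, hpre⟩)
        · exact ⟨p, hp, 0, by simpa [List.isPrefixOf_iff_prefix] using hpre⟩
        · exact ⟨p, hp, j + 1, by simpa using hpre⟩
      · rintro ⟨p, hp, j, hpre⟩
        cases j with
        | zero => exact Or.inl ⟨p, hp, by simpa [List.isPrefixOf_iff_prefix] using hpre⟩
        | succ j => exact Or.inr ⟨p, hp, j, by simpa using hpre⟩

theorem search_eq_any_isIn (branches : List String) (s : String) :
    regexSearch (branches.map String.toList) s.toList
      = branches.any (fun ind => PySem.Str.isIn ind s) := by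
  rw [Bool.eq_iff_iff]
  rw [regexSearch_iff, List.any_eq_true]
  constructor
  · rintro ⟨p, hp, j, hpre⟩
    obtain ⟨ind, hind, rfl⟩ := List.mem_map.mp hp
    refine ⟨ind, hind, ?_⟩
    rw [PySem.Str.isIn_iff_infix]
    exact (PySem.Chars.isIn_iff_infix _ _).mp ((PySem.Chars.exists_prefix_drop_iff_isIn _ _).mp ⟨j, hpre⟩)
  · rintro ⟨ind, hind, hin⟩
    have : (∃ j, ind.toList <+: s.toList.drop j) := by
      rw [PySem.Chars.exists_prefix_drop_iff_isIn, PySem.Chars.isIn_iff_infix]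
      exact (PySem.Str.isIn_iff_infix _ _).mp hin
    obtain ⟨j, hj⟩ := this
    exact ⟨ind.toList, List.mem_map_of_mem hind, j, hj⟩

-- ===== VERDICT (by name: the statement is the Claim_ definition above) =====
theorem is_entertainment_page_py_spec : Claim_equal_is_entertainment_page_py := by
  intro summary _
  unfold Spec_is_entertainment_page_py is_entertainment_page_py is_entertainment_page_py_alt
  rw [show entertainmentPattern = entertainmentIndicators.map String.toList from rfl,
      search_eq_any_isIn]
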